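-- pv_equiv track=rewrite | github.com/illiyaz/Verireceipt | app/pipelines/rules.py | _detect_us_state_hint
-- ===== SOURCE A (Python) =====
-- def _detect_us_state_hint(text: str) -> bool:
--     """Lightweight US signal: state abbreviations or common state names."""
--     us_hints = [
--         "alabama",
--         "alaska",
--         "arizona",
--         "arkansas",
--         "california",
--         "colorado",
--         "connecticut",
--         "delaware",
--         "florida",
--         "georgia",
--         "hawaii",
--         "idaho",
--         "illinois",
--         "indiana",
--         "iowa",
--         "kansas",
--         "kentucky",
--         "louisiana",
--         "maine",
--         "maryland",
--         "massachusetts",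
--         "michigan",
--         "minnesota",
--         "mississippi",
--         "missouri",
--         "montana",
--         "nebraska",
--         "nevada",
--         "new york",
--         "new jersey",
--         "new mexico",
--         "north carolina",
--         "north dakota",
--         "ohio",
--         "oklahoma",
--         "oregon",
--         "pennsylvania",
--         "rhode island",
--         "south carolina",
--         "south dakota",
--         "tennessee",
--         "texas",
--         "utah",
--         "vermont",
--         "virginia",
--         "washington",
--         "west virginia",
--         "wisconsin",
--         "wyoming",
--         # common abbreviations (space-padded matching below)
--         " ca ",
--         " ny ",
--         " nj ",
--         " tx ",
--         " fl ",
--         " il ",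
--         " in ",
--         " wa ",
--         " ma ",
--         " pa ",
--     ]
--     t = f" {(text or '').lower()} "
--     return any(h in t for h in us_hints)
-- ===== SOURCE B (Python) =====
-- _STATE_NAMES_CSV = (
--     "alabama,alaska,arizona,arkansas,california,colorado,connecticut,"
--     "delaware,florida,georgia,hawaii,idaho,illinois,indiana,iowa,kansas,"
--     "kentucky,louisiana,maine,maryland,massachusetts,michigan,minnesota,"
--     "mississippi,missouri,montana,nebraska,nevada,new york,new jersey,"
--     "new mexico,north carolina,north dakota,ohio,oklahoma,oregon,"
--     "pennsylvania,rhode island,south carolina,south dakota,tennessee,"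
--     "texas,utah,vermont,virginia,washington,west virginia,wisconsin,wyoming"
-- )
-- _ABBRS = "ca ny nj tx fl il in wa ma pa"
--
-- _PATTERNS = _STATE_NAMES_CSV.split(",") + [" %s " % a for a in _ABBRS.split()]
--
-- # Index the patterns by first character: bucket i holds the patterns whose
-- # first character has code point i, so each text position only tries the
-- # handful of patterns that can possibly start there.
-- _BY_FIRST = [[p for p in _PATTERNS if ord(p[0]) == i] for i in range(128)]
--
--
-- def _detect_us_state_hint(text: str) -> bool:
--     """Single left-to-right scan over the padded lowered text, consulting the
--     first-character bucket table at each position."""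
--     t = " " + (text or "").lower() + " "
--     for j in range(len(t)):
--         o = ord(t[j])
--         if o < 128:
--             for p in _BY_FIRST[o]:
--                 if t.startswith(p, j):
--                     return True
--     return False
-- ===== Notes on version B (the rewrite author's own statement) =====
-- stated objective: alternative
-- what changed: A runs 59 independent whole-text substring scans, one per hint literal; B precomputes a 128-entry first-character bucket table over the patterns (built from one CSV string) and makes a single left-to-right pass over the padded text, at each position trying only the patterns whose first character matches the character there.
import Mathlib
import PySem

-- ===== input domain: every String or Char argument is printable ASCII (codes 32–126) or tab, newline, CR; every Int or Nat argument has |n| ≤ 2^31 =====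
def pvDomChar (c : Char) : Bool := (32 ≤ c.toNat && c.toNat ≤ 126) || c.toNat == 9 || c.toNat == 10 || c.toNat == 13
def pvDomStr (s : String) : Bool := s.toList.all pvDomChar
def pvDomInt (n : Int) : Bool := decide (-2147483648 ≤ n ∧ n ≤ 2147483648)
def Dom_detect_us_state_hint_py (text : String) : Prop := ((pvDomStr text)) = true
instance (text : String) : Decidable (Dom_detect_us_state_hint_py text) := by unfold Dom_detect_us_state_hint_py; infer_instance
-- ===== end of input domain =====

-- B replaces A's 59 independent whole-text substring scans by one left-to-right pass over
-- the padded text consulting a 128-entry first-character bucket table (alternative).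

-- ===== PORT A =====
-- the `us_hints` literal of A, as lists of characters
def pvHintsA : List (List Char) :=
  ["alabama", "alaska", "arizona", "arkansas", "california", "colorado",
   "connecticut", "delaware", "florida", "georgia", "hawaii", "idaho",
   "illinois", "indiana", "iowa", "kansas", "kentucky", "louisiana",
   "maine", "maryland", "massachusetts", "michigan", "minnesota",
   "mississippi", "missouri", "montana", "nebraska", "nevada",
   "new york", "new jersey", "new mexico", "north carolina",
   "north dakota", "ohio", "oklahoma", "oregon", "pennsylvania",
   "rhode island", "south carolina", "south dakota", "tennessee",
   "texas", "utah", "vermont", "virginia", "washington",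
   "west virginia", "wisconsin", "wyoming",
   " ca ", " ny ", " nj ", " tx ", " fl ", " il ", " in ", " wa ",
   " ma ", " pa "].map String.toList

-- `text or ''` equals `text` for a str argument ('' is falsy and lowers to '');
-- f" {….lower()} " is the space-padded lowered text, built on the List Char side.
def detect_us_state_hint_py (text : String) : Bool :=
  let t : List Char := ' ' :: PySem.Chars.lower text.toList ++ [' ']
  pvHintsA.any (fun h => PySem.Chars.isIn h t)

-- ===== PORT B =====
-- Source B's _STATE_NAMES_CSV.split(",") + [" %s " % a for a in _ABBRS.split()]
def pvPatternsB : List (List Char) :=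
  PySem.Chars.splitOn ("alabama,alaska,arizona,arkansas,california,colorado,connecticut,delaware,florida,georgia,hawaii,idaho,illinois,indiana,iowa,kansas,kentucky,louisiana,maine,maryland,massachusetts,michigan,minnesota,mississippi,missouri,montana,nebraska,nevada,new york,new jersey,new mexico,north carolina,north dakota,ohio,oklahoma,oregon,pennsylvania,rhode island,south carolina,south dakota,tennessee,texas,utah,vermont,virginia,washington,west virginia,wisconsin,wyoming".toList) (",".toList)
  ++ (PySem.Chars.split₀ ("ca ny nj tx fl il in wa ma pa".toList)).map (fun a => ' ' :: a ++ [' '])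

-- Source B's bucket table: _BY_FIRST[i] = [p for p in _PATTERNS if ord(p[0]) == i];
-- every pattern is nonempty, so p[0] is ported as headD (never hits the default).
def pvByFirst : List (List (List Char)) :=
  (List.range 128).map (fun i => pvPatternsB.filter (fun p => (p.headD ' ').toNat == i))

-- the j-loop with early return is `List.any`; t[j] (always in range for j < len(t))
-- is ported via pyGet? with an irrelevant default; _BY_FIRST[o] via getD (o < 128 guard).
def detect_us_state_hint_py_alt (text : String) : Bool :=
  let t : List Char := ' ' :: PySem.Chars.lower text.toList ++ [' ']
  (List.range t.length).any (fun j =>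
    let o : Nat := ((PySem.List.pyGet? t (j : Int)).getD ' ').toNat
    if o < 128 then
      (pvByFirst.getD o []).any (fun p => PySem.Chars.startswith (t.drop j) p)
    else false)

-- ===== PRECONDITION & SPEC =====
def Spec_detect_us_state_hint_py (text : String) (out : Bool) : Prop := out = detect_us_state_hint_py_alt text
instance (text : String) (out : Bool) : Decidable (Spec_detect_us_state_hint_py text out) := by unfold Spec_detect_us_state_hint_py; infer_instance

-- ===== CLAIM (what is proved, stated in full; the proofs are below) =====
def Claim_equal_detect_us_state_hint_py : Prop := ∀ (text : String), Dom_detect_us_state_hint_py text → Spec_detect_us_state_hint_py text (detect_us_state_hint_py text)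

-- ===== LEMMAS AND PROOFS =====

-- the two closed pattern tables are the same list of strings
set_option maxRecDepth 8192 in
set_option maxHeartbeats 2000000 in
theorem pvPatterns_eq : pvPatternsB = pvHintsA := by decide

-- every pattern is nonempty with an ASCII first character
set_option maxRecDepth 8192 in
set_option maxHeartbeats 2000000 in
theorem pvPatterns_head : ∀ p ∈ pvPatternsB, p ≠ [] ∧ (p.headD ' ').toNat < 128 := by decide

-- bucket lookup is the filter, for o < 128
theorem pvByFirst_getD (o : Nat) (ho : o < 128) :
    pvByFirst.getD o [] = pvPatternsB.filter (fun p => (p.headD ' ').toNat == o) := by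
  unfold pvByFirst
  rw [List.getD_eq_getElem?_getD, List.getElem?_eq_getElem (by simpa using ho)]
  simp

-- B's bucketed positional scan finds a pattern iff some pattern is a substring of t
theorem pvScan_eq (t : List Char) :
    ((List.range t.length).any (fun j =>
      let o : Nat := ((PySem.List.pyGet? t (j : Int)).getD ' ').toNat
      if o < 128 then
        (pvByFirst.getD o []).any (fun p => PySem.Chars.startswith (t.drop j) p)
      else false))
      = pvPatternsB.any (fun h => PySem.Chars.isIn h t) := by
  apply Bool.eq_iff_iff.mpr
  simp only [List.any_eq_true, List.mem_range]
  constructor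
  · rintro ⟨j, hj, hmatch⟩
    by_cases ho : ((PySem.List.pyGet? t (j : Int)).getD ' ').toNat < 128
    · rw [if_pos ho] at hmatch
      simp only [List.any_eq_true] at hmatch
      obtain ⟨p, hpmem, hpre⟩ := hmatch
      rw [pvByFirst_getD _ ho] at hpmem
      have hpP : p ∈ pvPatternsB := List.mem_of_mem_filter hpmem
      refine ⟨p, hpP, ?_⟩
      exact (PySem.Chars.exists_prefix_drop_iff_isIn p t).mp
        ⟨j, (PySem.Chars.startswith_iff _ _).mp hpre⟩
    · rw [if_neg ho] at hmatch; exact absurd hmatch Bool.false_ne_true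
  · rintro ⟨p, hpmem, hin⟩
    obtain ⟨hne, hascii⟩ := pvPatterns_head p hpmem
    obtain ⟨c, ps, rfl⟩ := List.exists_cons_of_ne_nil hne
    obtain ⟨j, hpre⟩ := (PySem.Chars.exists_prefix_drop_iff_isIn _ t).mpr hin
    have hjlt : j < t.length := by
      by_contra hj
      have : t.drop j = [] := List.drop_eq_nil_of_le (by omega)
      rw [this] at hpre
      exact (List.cons_ne_nil c ps) (List.prefix_nil.mp hpre)
    -- the character at position j is c
    have hget : PySem.List.pyGet? t (j : Int) = some c := by
      rw [PySem.List.pyGet?_natCast]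
      obtain ⟨rest, hrest⟩ := hpre
      have : t[j]? = (t.drop j).head? := (List.head?_drop).symm
      rw [this, ← hrest]; rfl
    refine ⟨j, hjlt, ?_⟩
    simp only [hget, Option.getD_some]
    have hc : c.toNat < 128 := by simpa using hascii
    rw [if_pos hc, pvByFirst_getD _ hc]
    simp only [List.any_eq_true]
    refine ⟨c :: ps, ?_, (PySem.Chars.startswith_iff _ _).mpr hpre⟩
    exact List.mem_filter.mpr ⟨hpmem, by simp⟩

-- ===== VERDICT (by name: the statement is the Claim_ definition above) =====
theorem detect_us_state_hint_py_spec : Claim_equal_detect_us_state_hint_py := by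
  intro text _
  unfold Spec_detect_us_state_hint_py detect_us_state_hint_py detect_us_state_hint_py_alt
  rw [pvScan_eq, pvPatterns_eq]
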